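-- pv_equiv track=rewrite | github.com/Leezy-Ray/GeneType | alignment_utils.py | _find_longest_match_region
-- ===== SOURCE A (Python) =====
-- from typing import List, Tuple, Optional
--
-- def _parse_cigar(cigar_str: str) -> List[Tuple[int, str]]:
--     """解析CIGAR字符串，返回(长度, 操作)列表"""
--     operations = []
--     current_len = ""
--     for c in cigar_str:
--         if c.isdigit():
--             current_len += c
--         else:
--             if current_len:
--                 operations.append((int(current_len), c))
--             current_len = ""
--     return operations
--
-- def _find_longest_match_region(cigar_str: str, beg_ref: int, beg_query: int) -> dict:
--     """
--     从CIGAR字符串中找到最长的连续匹配区域。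
--     这是SnapGene显示的"核心比对区域"。
--     """
--     operations = _parse_cigar(cigar_str)
--
--     best_match_len = 0
--     best_ref_start = 0
--     best_query_start = 0
--
--     ref_pos = beg_ref
--     query_pos = beg_query
--
--     for length, op in operations:
--         if op == '=':  # 匹配
--             if length > best_match_len:
--                 best_match_len = length
--                 best_ref_start = ref_pos
--                 best_query_start = query_pos
--             ref_pos += length
--             query_pos += length
--         elif op == 'X':  # 错配
--             ref_pos += length
--             query_pos += length
--         elif op == 'I':  # 插入
--             query_pos += length
--         elif op == 'D':  # 删除
--             ref_pos += length
--
--     return {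
--         "match_length": best_match_len,
--         "ref_start": best_ref_start,
--         "ref_end": best_ref_start + best_match_len,
--         "query_start": best_query_start,
--         "query_end": best_query_start + best_match_len,
--     }
-- ===== SOURCE B (Python) =====
-- def _find_longest_match_region(cigar_str: str, beg_ref: int, beg_query: int) -> dict:
--     # Single fused pass over the characters: the digit run is accumulated as an
--     # integer and each operation letter is applied immediately; no intermediate
--     # (length, op) list is ever built.
--     best = ref_start = query_start = 0
--     ref_pos, query_pos = beg_ref, beg_query
--     cur = 0
--     has = False
--     for c in cigar_str:
--         if c.isdigit():
--             cur = cur * 10 + (ord(c) - 48)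
--             has = True
--         else:
--             if has:
--                 if c == '=':
--                     if cur > best:
--                         best, ref_start, query_start = cur, ref_pos, query_pos
--                     ref_pos += cur
--                     query_pos += cur
--                 elif c == 'X':
--                     ref_pos += cur
--                     query_pos += cur
--                 elif c == 'I':
--                     query_pos += cur
--                 elif c == 'D':
--                     ref_pos += cur
--             cur = 0
--             has = False
--     return {
--         "match_length": best,
--         "ref_start": ref_start,
--         "ref_end": ref_start + best,
--         "query_start": query_start,
--         "query_end": query_start + best,
--     }
-- ===== Notes on version B (the rewrite author's own statement) =====
-- stated objective: alternative
-- what changed: B fuses A's two phases (build the (length, op) list with _parse_cigar, then scan it) into one streaming pass over the characters that accumulates the digit run as a running integer and applies each operation letter the moment it is seen, never materialising the operations list.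
import Mathlib
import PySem

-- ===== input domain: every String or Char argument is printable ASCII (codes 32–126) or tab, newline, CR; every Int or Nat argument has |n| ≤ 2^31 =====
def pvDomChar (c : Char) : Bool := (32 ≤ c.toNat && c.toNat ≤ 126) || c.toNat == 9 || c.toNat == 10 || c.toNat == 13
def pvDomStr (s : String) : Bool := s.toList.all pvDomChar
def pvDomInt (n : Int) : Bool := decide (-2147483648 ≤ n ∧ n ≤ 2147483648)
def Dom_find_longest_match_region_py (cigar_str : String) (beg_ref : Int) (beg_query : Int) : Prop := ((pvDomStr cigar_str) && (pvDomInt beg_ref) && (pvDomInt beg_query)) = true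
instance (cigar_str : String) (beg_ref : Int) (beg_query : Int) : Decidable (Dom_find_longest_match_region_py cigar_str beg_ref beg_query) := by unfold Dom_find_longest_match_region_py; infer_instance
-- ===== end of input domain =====

-- B replaces A's two-phase parse-then-scan with one fused streaming pass over the characters (objective: alternative decomposition).

-- ===== PORT A =====
-- Hand port of Python's int(s): _parse_cigar only ever calls int() on a nonempty
-- string of ASCII digits (current_len is built exclusively from isdigit characters),
-- and on such strings int(s) is exactly this left fold over the digit values.
def pvIntOfDigits (cs : List Char) : Int :=
  cs.foldl (fun a c => a * 10 + ((c.toNat : Int) - 48)) 0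

-- loop body of _parse_cigar: state = (operations, current_len)
def pvParseStep (st : List (Int × Char) × List Char) (c : Char) : List (Int × Char) × List Char :=
  if PySem.Chars.isdigit c then (st.1, st.2 ++ [c])
  else (if st.2 ≠ [] then st.1 ++ [(pvIntOfDigits st.2, c)] else st.1, [])

def pvParseCigar (cigar_str : String) : List (Int × Char) :=
  (cigar_str.toList.foldl pvParseStep ([], [])).1

-- loop body of the scan over operations: state = (best_match_len, best_ref_start, best_query_start, ref_pos, query_pos)
def pvScanStep : (Int × Int × Int × Int × Int) → (Int × Char) → (Int × Int × Int × Int × Int)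
  | (best, brs, bqs, rp, qp), (length, op) =>
    if op = '=' then
      if length > best then (length, rp, qp, rp + length, qp + length)
      else (best, brs, bqs, rp + length, qp + length)
    else if op = 'X' then (best, brs, bqs, rp + length, qp + length)
    else if op = 'I' then (best, brs, bqs, rp, qp + length)
    else if op = 'D' then (best, brs, bqs, rp + length, qp)
    else (best, brs, bqs, rp, qp)

def find_longest_match_region_py (cigar_str : String) (beg_ref : Int) (beg_query : Int) : List (String × Int) :=
  let st := (pvParseCigar cigar_str).foldl pvScanStep (0, 0, 0, beg_ref, beg_query)
  [("match_length", st.1), ("ref_start", st.2.1), ("ref_end", st.2.1 + st.1),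
   ("query_start", st.2.2.1), ("query_end", st.2.2.1 + st.1)]

-- ===== PORT B =====
-- loop body of B's single fused pass: state = (cur, has, best, ref_start, query_start, ref_pos, query_pos)
def pvFuseStep : (Int × Bool × Int × Int × Int × Int × Int) → Char → (Int × Bool × Int × Int × Int × Int × Int)
  | (cur, has, best, brs, bqs, rp, qp), c =>
    if PySem.Chars.isdigit c then (cur * 10 + ((c.toNat : Int) - 48), true, best, brs, bqs, rp, qp)
    else if has then
      if c = '=' then
        if cur > best then (0, false, cur, rp, qp, rp + cur, qp + cur)
        else (0, false, best, brs, bqs, rp + cur, qp + cur)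
      else if c = 'X' then (0, false, best, brs, bqs, rp + cur, qp + cur)
      else if c = 'I' then (0, false, best, brs, bqs, rp, qp + cur)
      else if c = 'D' then (0, false, best, brs, bqs, rp + cur, qp)
      else (0, false, best, brs, bqs, rp, qp)
    else (0, false, best, brs, bqs, rp, qp)

def find_longest_match_region_py_alt (cigar_str : String) (beg_ref : Int) (beg_query : Int) : List (String × Int) :=
  let st := cigar_str.toList.foldl pvFuseStep (0, false, 0, 0, 0, beg_ref, beg_query)
  [("match_length", st.2.2.1), ("ref_start", st.2.2.2.1), ("ref_end", st.2.2.2.1 + st.2.2.1),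
   ("query_start", st.2.2.2.2.1), ("query_end", st.2.2.2.2.1 + st.2.2.1)]

-- ===== PRECONDITION & SPEC =====
def Spec_find_longest_match_region_py (cigar_str : String) (beg_ref : Int) (beg_query : Int) (out : List (String × Int)) : Prop := out = find_longest_match_region_py_alt cigar_str beg_ref beg_query
instance (cigar_str : String) (beg_ref : Int) (beg_query : Int) (out : List (String × Int)) : Decidable (Spec_find_longest_match_region_py cigar_str beg_ref beg_query out) := by unfold Spec_find_longest_match_region_py; infer_instance

-- ===== CLAIM (what is proved, stated in full; the proofs are below) =====
def Claim_equal_find_longest_match_region_py : Prop := ∀ (cigar_str : String) (beg_ref : Int) (beg_query : Int), Dom_find_longest_match_region_py cigar_str beg_ref beg_query → Spec_find_longest_match_region_py cigar_str beg_ref beg_query (find_longest_match_region_py cigar_str beg_ref beg_query)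

-- ===== LEMMAS AND PROOFS =====

-- _parse_cigar's foldl accumulates by appending: the already-collected prefix factors out.
lemma pv_parse_acc (cs : List Char) : ∀ (acc : List (Int × Char)) (ds : List Char),
    cs.foldl pvParseStep (acc, ds)
      = (acc ++ (cs.foldl pvParseStep ([], ds)).1, (cs.foldl pvParseStep ([], ds)).2) := by
  induction cs with
  | nil => intro acc ds; simp
  | cons c cs ih =>
    intro acc ds
    simp only [List.foldl_cons, pvParseStep]
    by_cases h : PySem.Chars.isdigit c
    · simp only [h, reduceIte]
      rw [ih acc (ds ++ [c])]
    · by_cases hds : ds = []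
      · subst hds
        simp only [h, Bool.false_eq_true, reduceIte, ne_eq, not_true_eq_false]
        rw [ih acc []]
      · simp only [h, Bool.false_eq_true, reduceIte, ne_eq, hds, not_false_iff,
          if_true, List.nil_append]
        rw [ih (acc ++ [(pvIntOfDigits ds, c)]) [], ih [(pvIntOfDigits ds, c)] []]
        simp

lemma pv_intOfDigits_append (ds : List Char) (c : Char) :
    pvIntOfDigits (ds ++ [c]) = pvIntOfDigits ds * 10 + ((c.toNat : Int) - 48) := by
  simp [pvIntOfDigits, List.foldl_append]

-- main invariant: the fused pass, started with a pending digit run ds, computes the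
-- same (best, ref_start, query_start, ref_pos, query_pos) as parsing the rest and scanning.
lemma pv_fuse_eq (cs : List Char) : ∀ (ds : List Char) (best brs bqs rp qp : Int),
    (cs.foldl pvFuseStep (pvIntOfDigits ds, !ds.isEmpty, best, brs, bqs, rp, qp)).2.2
      = (cs.foldl pvParseStep ([], ds)).1.foldl pvScanStep (best, brs, bqs, rp, qp) := by
  induction cs with
  | nil => intro ds best brs bqs rp qp; simp
  | cons c cs ih =>
    intro ds best brs bqs rp qp
    simp only [List.foldl_cons]
    by_cases h : PySem.Chars.isdigit c
    · have hstep : pvFuseStep (pvIntOfDigits ds, !ds.isEmpty, best, brs, bqs, rp, qp) c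
          = (pvIntOfDigits (ds ++ [c]), !(ds ++ [c]).isEmpty, best, brs, bqs, rp, qp) := by
        simp [pvFuseStep, h, pv_intOfDigits_append]
      rw [hstep, ih (ds ++ [c])]
      simp [pvParseStep, h]
    · by_cases hds : ds = []
      · subst hds
        have hstep : pvFuseStep (pvIntOfDigits [], !([] : List Char).isEmpty, best, brs, bqs, rp, qp) c
            = (pvIntOfDigits [], !([] : List Char).isEmpty, best, brs, bqs, rp, qp) := by
          simp [pvFuseStep, pvIntOfDigits, h]
        rw [hstep, ih []]
        simp [pvParseStep, h]
      · have hstep : pvFuseStep (pvIntOfDigits ds, !ds.isEmpty, best, brs, bqs, rp, qp) c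
            = (pvIntOfDigits [], !([] : List Char).isEmpty,
               pvScanStep (best, brs, bqs, rp, qp) (pvIntOfDigits ds, c)) := by
          have hne : ds.isEmpty = false := by simp [hds]
          simp only [pvFuseStep, pvScanStep, h, Bool.false_eq_true, if_false, hne,
            Bool.not_false, if_true, pvIntOfDigits, List.foldl_nil,
            List.isEmpty_nil]
          split_ifs <;> rfl
        rw [hstep, ih []]
        have hparse : pvParseStep ([], ds) c = ([(pvIntOfDigits ds, c)], []) := by
          simp [pvParseStep, h, hds]
        rw [hparse, pv_parse_acc cs [(pvIntOfDigits ds, c)] []]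
        simp

-- ===== VERDICT (by name: the statement is the Claim_ definition above) =====
theorem find_longest_match_region_py_spec : Claim_equal_find_longest_match_region_py := by
  intro cigar_str beg_ref beg_query _
  unfold Spec_find_longest_match_region_py
  unfold find_longest_match_region_py find_longest_match_region_py_alt pvParseCigar
  have h := pv_fuse_eq cigar_str.toList [] 0 0 0 beg_ref beg_query
  simp only [pvIntOfDigits, List.foldl_nil, List.isEmpty_nil, Bool.not_true] at h
  rw [← h]
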